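-- pv_equiv track=rewrite | github.com/KoslickiLab/fmh_cosine_reproducibles | fig_2/run_using_fmh/run_by_fmh_wrapper.py | get_dot_product
-- ===== SOURCE A (Python) =====
-- def get_dot_product(sig1, sig2):
--     if len(sig1) == 0 or len(sig2) == 0:
--         return 0
--
--     i = 0
--     j = 0
--     dot_product = 0
--
--     while i < len(sig1) and j < len(sig2):
--         if sig1[i][0] == sig2[j][0]:
--             dot_product += sig1[i][1] * sig2[j][1]
--             i += 1
--             j += 1
--         elif sig1[i][0] < sig2[j][0]:
--             i += 1
--         else:
--             j += 1
--
--     return dot_product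
-- ===== SOURCE B (Python) =====
-- def get_dot_product(sig1, sig2):
--     d = dict(sig1)
--     dot_product = 0
--     for k, v in sig2:
--         if k in d:
--             dot_product += v * d[k]
--     return dot_product
-- ===== Notes on version B (the rewrite author's own statement) =====
-- stated objective: idiomatic
-- what changed: Replaces the sorted two-pointer merge with a dict built from sig1 and a single hash-lookup pass over sig2, removing all index bookkeeping.
-- outside the precondition, e.g. on get_dot_product([(1, 2), (1, 3)], [(1, 5)]): A returns 10, B returns 15; on get_dot_product([(2, 1), (1, 1)], [(1, 1), (2, 1)]): A returns 1, B returns 2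
import Mathlib
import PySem

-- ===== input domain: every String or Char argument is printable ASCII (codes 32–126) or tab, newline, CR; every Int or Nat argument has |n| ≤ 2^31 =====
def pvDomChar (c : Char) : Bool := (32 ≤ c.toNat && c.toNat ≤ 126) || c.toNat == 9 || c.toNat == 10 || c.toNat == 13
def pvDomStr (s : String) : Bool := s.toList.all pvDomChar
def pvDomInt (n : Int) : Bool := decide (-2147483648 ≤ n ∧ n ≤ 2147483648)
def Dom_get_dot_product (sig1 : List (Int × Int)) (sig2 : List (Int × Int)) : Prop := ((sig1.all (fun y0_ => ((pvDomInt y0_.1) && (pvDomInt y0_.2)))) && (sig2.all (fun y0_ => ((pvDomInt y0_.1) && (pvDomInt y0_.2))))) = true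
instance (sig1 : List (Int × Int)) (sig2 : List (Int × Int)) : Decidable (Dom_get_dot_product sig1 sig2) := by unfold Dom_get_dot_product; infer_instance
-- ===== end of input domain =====

-- B replaces A's sorted two-pointer merge by a dict built from sig1 plus one lookup pass over sig2 (idiomatic; same cost).


-- ===== PORT A =====
-- the while loop, as the obvious structural recursion on the two suffixes (i, j only move forward)
def getDotLoopA : List (Int × Int) → List (Int × Int) → Int → Int
  | [], _, dot_product => dot_product
  | _ :: _, [], dot_product => dot_product
  | (k1, v1) :: t1, (k2, v2) :: t2, dot_product =>
    if k1 = k2 then getDotLoopA t1 t2 (dot_product + v1 * v2)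
    else if k1 < k2 then getDotLoopA t1 ((k2, v2) :: t2) dot_product
    else getDotLoopA ((k1, v1) :: t1) t2 dot_product
termination_by s1 s2 _ => s1.length + s2.length

def get_dot_product (sig1 : List (Int × Int)) (sig2 : List (Int × Int)) : Int :=
  if sig1.length = 0 ∨ sig2.length = 0 then 0
  else getDotLoopA sig1 sig2 0

-- ===== PORT B =====
def get_dot_product_alt (sig1 : List (Int × Int)) (sig2 : List (Int × Int)) : Int :=
  let d := sig1.foldl (fun d kv => d.insert kv.1 kv.2) (PySem.Dict.empty : PySem.Dict Int Int)
  sig2.foldl (fun dot_product kv =>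
    if d.contains kv.1 then dot_product + kv.2 * d.getD kv.1 0 else dot_product) 0

-- ===== PRECONDITION & SPEC =====
-- Pre_ covers the function's natural domain — sorted sparse vectors (keys strictly increasing in each
-- list) — together with every key-disjoint input (there no match ever fires and both return 0 whatever
-- the order); excluded are only unsorted or duplicate-keyed inputs with overlapping keys, where A's
-- two-pointer merge returns an order-dependent partial sum that no caller of this code can rely on,
-- and B's per-key value there is as defensible.
def Pre_get_dot_product (sig1 : List (Int × Int)) (sig2 : List (Int × Int)) : Prop :=
  (List.Pairwise (fun a b => a.1 < b.1) sig1 ∧ List.Pairwise (fun a b => a.1 < b.1) sig2)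
  ∨ (∀ p ∈ sig1, ∀ q ∈ sig2, p.1 ≠ q.1)
instance (sig1 : List (Int × Int)) (sig2 : List (Int × Int)) : Decidable (Pre_get_dot_product sig1 sig2) := by unfold Pre_get_dot_product; infer_instance
def pvWitness_get_dot_product : (List (Int × Int)) × (List (Int × Int)) :=
  ([(1, 2), (3, 4), (7, -1)], [(2, 5), (3, 6)])

def Spec_get_dot_product (sig1 : List (Int × Int)) (sig2 : List (Int × Int)) (out : Int) : Prop := out = get_dot_product_alt sig1 sig2
instance (sig1 : List (Int × Int)) (sig2 : List (Int × Int)) (out : Int) : Decidable (Spec_get_dot_product sig1 sig2 out) := by unfold Spec_get_dot_product; infer_instance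

-- ===== CLAIM (what is proved, stated in full; the proofs are below) =====
def Claim_equal_get_dot_product : Prop := ∀ (sig1 : List (Int × Int)) (sig2 : List (Int × Int)), Dom_get_dot_product sig1 sig2 → Pre_get_dot_product sig1 sig2 → Spec_get_dot_product sig1 sig2 (get_dot_product sig1 sig2)

-- ===== LEMMAS AND PROOFS =====

-- payoff of one sig2 entry against sig1 (first-match lookup), and the common mathematical spec
def pvPay (s1 : List (Int × Int)) (kv : Int × Int) : Int :=
  match s1.find? (fun p => p.1 == kv.1) with
  | some p => kv.2 * p.2
  | none => 0

def pvDotS (s1 s2 : List (Int × Int)) : Int := (s2.map (pvPay s1)).sum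

theorem pvPay_nil (kv : Int × Int) : pvPay [] kv = 0 := rfl

theorem pvDotS_nil_left (s2 : List (Int × Int)) : pvDotS [] s2 = 0 := by
  unfold pvDotS
  rw [List.map_congr_left (fun kv _ => pvPay_nil kv)]
  simp

theorem pvPay_cons_ne (k1 v1 : Int) (t1 : List (Int × Int)) (kv : Int × Int)
    (h : kv.1 ≠ k1) : pvPay ((k1, v1) :: t1) kv = pvPay t1 kv := by
  have hb : (k1 == kv.1) = false := by simpa using Ne.symm h
  simp [pvPay, List.find?, hb]

theorem pvPay_none (s1 : List (Int × Int)) (kv : Int × Int)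
    (h : ∀ p ∈ s1, p.1 ≠ kv.1) : pvPay s1 kv = 0 := by
  have : s1.find? (fun p => p.1 == kv.1) = none := by
    apply List.find?_eq_none.2
    intro p hp
    simpa using h p hp
  simp [pvPay, this]

theorem pvDotS_cons_left (k1 v1 : Int) (t1 s2 : List (Int × Int))
    (h : ∀ kv ∈ s2, k1 < kv.1) : pvDotS ((k1, v1) :: t1) s2 = pvDotS t1 s2 := by
  unfold pvDotS
  rw [List.map_congr_left (fun kv hkv =>
    pvPay_cons_ne k1 v1 t1 kv (by have := h kv hkv; omega))]

-- A's loop computes the shared spec on strictly sorted inputs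
theorem getDotLoopA_eq (s1 s2 : List (Int × Int)) (acc : Int) :
    List.Pairwise (fun a b => a.1 < b.1) s1 →
    List.Pairwise (fun a b => a.1 < b.1) s2 →
    getDotLoopA s1 s2 acc = acc + pvDotS s1 s2 := by
  fun_induction getDotLoopA s1 s2 acc with
  | case1 s2 acc =>
    intro _ _; simp [pvDotS_nil_left]
  | case2 p t acc =>
    intro _ _; simp [pvDotS]
  | case3 v1 t1 k2 v2 t2 acc ih =>
    intro h1 h2
    have h1' := List.pairwise_cons.1 h1
    have h2' := List.pairwise_cons.1 h2
    rw [ih h1'.2 h2'.2]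
    have hstep : pvDotS ((k2, v1) :: t1) ((k2, v2) :: t2) = v2 * v1 + pvDotS t1 t2 := by
      unfold pvDotS
      rw [List.map_cons, List.sum_cons]
      have hpay : pvPay ((k2, v1) :: t1) (k2, v2) = v2 * v1 := by
        simp [pvPay, List.find?]
      rw [hpay,
        List.map_congr_left (fun kv hkv =>
          pvPay_cons_ne k2 v1 t1 kv (by have := h2'.1 kv hkv; omega))]
    rw [hstep]; ring
  | case4 k1 v1 t1 k2 v2 t2 acc hne hlt ih =>
    intro h1 h2
    have h1' := List.pairwise_cons.1 h1
    rw [ih h1'.2 h2]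
    have heq : pvDotS ((k1, v1) :: t1) ((k2, v2) :: t2) = pvDotS t1 ((k2, v2) :: t2) := by
      apply pvDotS_cons_left
      intro kv hkv
      rcases List.mem_cons.1 hkv with h | h
      · subst h; exact hlt
      · have := (List.pairwise_cons.1 h2).1 kv h; omega
    rw [heq]
  | case5 k1 v1 t1 k2 v2 t2 acc hne hnlt ih =>
    intro h1 h2
    have h2' := List.pairwise_cons.1 h2
    rw [ih h1 h2'.2]
    have heq : pvDotS ((k1, v1) :: t1) ((k2, v2) :: t2) = pvDotS ((k1, v1) :: t1) t2 := by
      unfold pvDotS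
      rw [List.map_cons, List.sum_cons]
      have hpay : pvPay ((k1, v1) :: t1) (k2, v2) = 0 := by
        apply pvPay_none
        intro p hp
        rcases List.mem_cons.1 hp with h | h
        · subst h; simp; omega
        · have := (List.pairwise_cons.1 h1).1 p h; simp; omega
      rw [hpay]; ring
    rw [heq]

-- the dict built by B is literally the association list sig1 (keys are distinct)
theorem pvDict_items (s1 : List (Int × Int)) (hnd : (s1.map (·.1)).Nodup) :
    s1.foldl (fun d kv => d.insert kv.1 kv.2) (PySem.Dict.empty : PySem.Dict Int Int)
      = PySem.Dict.mk s1 := by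
  apply PySem.Dict.ext
  have := PySem.Dict.items_foldl_insert_fresh (l := s1) (k := (·.1)) (v := (·.2))
    (d := (PySem.Dict.empty : PySem.Dict Int Int))
    (by intro a _; simp [PySem.Dict.contains_empty]) hnd
  simpa [PySem.Dict.empty] using this

theorem pvGet?_mk_eq_find? (s1 : List (Int × Int)) (k : Int) :
    (PySem.Dict.mk s1).get? k = (s1.find? (fun p => p.1 == k)).map (·.2) := by
  induction s1 with
  | nil => rfl
  | cons p t ih =>
    rw [show (p :: t) = ((p.1, p.2) :: t) by simp, PySem.Dict.get?_mk_cons]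
    simp only [List.find?]
    cases hb : (p.1 == k) with
    | true => simp
    | false => simpa using ih

-- B's fold step adds exactly pvPay
theorem pvAltStep (s1 : List (Int × Int)) (kv : Int × Int) (acc : Int) :
    (if (PySem.Dict.mk s1).contains kv.1 then acc + kv.2 * (PySem.Dict.mk s1).getD kv.1 0 else acc)
      = acc + pvPay s1 kv := by
  rw [PySem.Dict.contains_eq_isSome_get?, PySem.Dict.getD_eq_get?_getD, pvGet?_mk_eq_find?]
  unfold pvPay
  cases h : s1.find? (fun p => p.1 == kv.1) with
  | none => simp
  | some p => simp

theorem pvAlt_eq (sig1 sig2 : List (Int × Int)) (hnd : (sig1.map (·.1)).Nodup) :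
    get_dot_product_alt sig1 sig2 = pvDotS sig1 sig2 := by
  unfold get_dot_product_alt
  rw [pvDict_items sig1 hnd]
  have : ∀ (l : List (Int × Int)) (acc : Int),
      l.foldl (fun dot kv =>
        if (PySem.Dict.mk sig1).contains kv.1 then dot + kv.2 * (PySem.Dict.mk sig1).getD kv.1 0 else dot) acc
        = acc + pvDotS sig1 l := by
    intro l
    induction l with
    | nil => intro acc; simp [pvDotS]
    | cons kv t ih =>
      intro acc
      rw [List.foldl_cons, pvAltStep, ih]
      unfold pvDotS
      rw [List.map_cons, List.sum_cons]
      ring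
  simpa using this sig2 0

-- the key-disjoint region: A's match branch never fires, so the loop returns its accumulator
theorem getDotLoopA_disjoint (s1 s2 : List (Int × Int)) (acc : Int)
    (h : ∀ p ∈ s1, ∀ q ∈ s2, p.1 ≠ q.1) : getDotLoopA s1 s2 acc = acc := by
  fun_induction getDotLoopA s1 s2 acc with
  | case1 s2 acc => rfl
  | case2 p t acc => rfl
  | case3 v1 t1 k2 v2 t2 acc ih =>
    exact absurd rfl (h (k2, v1) List.mem_cons_self (k2, v2) List.mem_cons_self)
  | case4 k1 v1 t1 k2 v2 t2 acc hne hlt ih =>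
    exact ih (fun p hp q hq => h p (List.mem_cons_of_mem _ hp) q hq)
  | case5 k1 v1 t1 k2 v2 t2 acc hne hnlt ih =>
    exact ih (fun p hp q hq => h p hp q (List.mem_cons_of_mem _ hq))

-- and B never finds a key of sig2 in the dict built from sig1
theorem pvAlt_disjoint (sig1 sig2 : List (Int × Int))
    (h : ∀ p ∈ sig1, ∀ q ∈ sig2, p.1 ≠ q.1) : get_dot_product_alt sig1 sig2 = 0 := by
  unfold get_dot_product_alt
  have hkeys : ∀ q ∈ sig2,
      (sig1.foldl (fun d kv => d.insert kv.1 kv.2)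
        (PySem.Dict.empty : PySem.Dict Int Int)).contains q.1 = false := by
    intro q hq
    rw [PySem.Dict.contains_eq_decide_mem_keys]
    have hk : (sig1.foldl (fun d kv => d.insert kv.1 kv.2)
        (PySem.Dict.empty : PySem.Dict Int Int)).keys
        = PySem.Set.update (PySem.Dict.empty : PySem.Dict Int Int).keys (sig1.map (·.1)) :=
      PySem.Dict.keys_foldl_insert_key sig1 (·.1) (fun d kv => kv.2) PySem.Dict.empty
    rw [hk]
    simp only [decide_eq_false_iff_not]
    intro hmem
    have : q.1 ∈ sig1.map (·.1) := by
      have := (PySem.Set.mem_update _ _ _).1 hmem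
      rcases this with h' | h'
      · exact absurd h' (by simp [PySem.Dict.keys_empty])
      · exact h'
    rcases List.mem_map.1 this with ⟨p, hp, hpq⟩
    exact h p hp q hq hpq
  induction sig2 with
  | nil => rfl
  | cons q t ih =>
    rw [List.foldl_cons, if_neg (by simp [hkeys q List.mem_cons_self])]
    exact ih (fun p hp r hr => h p hp r (List.mem_cons_of_mem _ hr))
      (fun r hr => hkeys r (List.mem_cons_of_mem _ hr))

-- ===== VERDICT (by name: the statement is the Claim_ definition above) =====
theorem get_dot_product_spec : Claim_equal_get_dot_product := by
  intro sig1 sig2 _ hpre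
  unfold Spec_get_dot_product
  rcases hpre with hpre | hdisj
  case inr =>
    rw [pvAlt_disjoint sig1 sig2 hdisj]
    unfold get_dot_product
    split
    · rfl
    · exact getDotLoopA_disjoint sig1 sig2 0 hdisj
  have hnd : (sig1.map (·.1)).Nodup :=
    List.pairwise_map.2 (hpre.1.imp (by intro a b h; omega))
  rw [pvAlt_eq sig1 sig2 hnd]
  unfold get_dot_product
  split
  · rename_i h
    rcases h with h | h
    · rw [List.length_eq_zero_iff.1 h, pvDotS_nil_left]
    · rw [List.length_eq_zero_iff.1 h]; rfl
  · rw [getDotLoopA_eq sig1 sig2 0 hpre.1 hpre.2]; ring
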